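-- pv_equiv track=rewrite | github.com/nikitabolkar123/daily_practice_problems | practice_problmes/logical/sum_of_lst_ele.py | lst_ele_sum
-- ===== SOURCE A (Python) =====
-- def lst_ele_sum(lst):
--     lst1 = []
--     for i in range(len(lst)):
--         sum_of_others = 0
--         for j in range(len(lst)):
--             if i != j:
--                 sum_of_others += lst[j]
--         lst1.append(sum_of_others)
--     return lst1
-- ===== SOURCE B (Python) =====
-- def lst_ele_sum(lst):
--     total = sum(lst)
--     return [total - x for x in lst]
-- ===== Notes on version B (the rewrite author's own statement) =====
-- stated objective: faster
-- what changed: Replaces the quadratic nested loop (re-summing all other elements for each index) by computing the total sum once and returning total minus each element.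
import Mathlib
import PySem

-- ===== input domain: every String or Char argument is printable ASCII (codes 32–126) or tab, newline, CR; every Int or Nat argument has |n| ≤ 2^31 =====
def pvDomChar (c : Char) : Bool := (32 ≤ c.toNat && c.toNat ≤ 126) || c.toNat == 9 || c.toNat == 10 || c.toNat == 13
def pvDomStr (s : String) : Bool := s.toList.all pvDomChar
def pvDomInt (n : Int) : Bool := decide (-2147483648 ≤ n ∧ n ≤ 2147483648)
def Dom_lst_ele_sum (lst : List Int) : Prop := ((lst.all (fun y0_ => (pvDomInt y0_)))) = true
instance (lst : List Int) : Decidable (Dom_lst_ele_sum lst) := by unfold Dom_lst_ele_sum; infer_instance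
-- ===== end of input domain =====

-- B computes the total sum once and returns total minus each element (O(n) instead of A's O(n^2)).

-- ===== PORT A =====
def lst_ele_sum (lst : List Int) : List Int :=
  (PySem.List.pyRange 0 (lst.length : Int) 1).foldl
    (fun lst1 i =>
      lst1 ++ [(PySem.List.pyRange 0 (lst.length : Int) 1).foldl
        (fun sum_of_others j =>
          if i ≠ j then sum_of_others + PySem.List.pyGetD lst j 0 else sum_of_others) 0])
    []

-- ===== PORT B =====
def lst_ele_sum_alt (lst : List Int) : List Int :=
  let total := lst.foldl (· + ·) 0
  lst.map (fun x => total - x)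

-- ===== PRECONDITION & SPEC =====
def Spec_lst_ele_sum (lst : List Int) (out : List Int) : Prop := out = lst_ele_sum_alt lst
instance (lst : List Int) (out : List Int) : Decidable (Spec_lst_ele_sum lst out) := by unfold Spec_lst_ele_sum; infer_instance

-- ===== CLAIM (what is proved, stated in full; the proofs are below) =====
def Claim_equal_lst_ele_sum : Prop := ∀ (lst : List Int), Dom_lst_ele_sum lst → Spec_lst_ele_sum lst (lst_ele_sum lst)

-- ===== LEMMAS AND PROOFS =====

-- the ite-guarded sum loop ignores the guard on a segment not containing i
lemma pv_foldl_ite_skip (g : Int → Int) (i : Int) (L : List Int) (hi : i ∉ L) (init : Int) :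
    L.foldl (fun s j => if i ≠ j then s + g j else s) init
      = L.foldl (fun s j => s + g j) init := by
  induction L generalizing init with
  | nil => rfl
  | cons a t ih =>
      have hne : i ≠ a := fun h => hi (h ▸ List.mem_cons_self)
      have ht : i ∉ t := fun h => hi (List.mem_cons_of_mem _ h)
      rw [List.foldl_cons, List.foldl_cons, if_pos hne, ih ht]

lemma pv_foldl_add_eq (g : Int → Int) (L : List Int) (init : Int) :
    L.foldl (fun s j => s + g j) init = init + (L.map g).sum := by
  induction L generalizing init with
  | nil => simp
  | cons a t ih => simp [List.foldl, ih]; ring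

-- inner loop of A = total - lst[i]
lemma pv_inner_eq (lst : List Int) (i : Int) (h0 : 0 ≤ i) (h1 : i < (lst.length : Int)) :
    (PySem.List.pyRange 0 (lst.length : Int) 1).foldl
        (fun s j => if i ≠ j then s + PySem.List.pyGetD lst j 0 else s) 0
      = lst.foldl (· + ·) 0 - PySem.List.pyGetD lst i 0 := by
  set n : Int := (lst.length : Int) with hn
  set g : Int → Int := fun j => PySem.List.pyGetD lst j 0 with hg
  have hsplit : PySem.List.pyRange 0 n 1
      = PySem.List.pyRange 0 i 1 ++ (i :: PySem.List.pyRange (i+1) n 1) := by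
    rw [PySem.List.pyRange_one_append 0 i n h0 (le_of_lt h1),
        PySem.List.pyRange_one_cons h1]
  have hpre : i ∉ PySem.List.pyRange 0 i 1 := by
    simp [PySem.List.mem_pyRange_one]
  have hpost : i ∉ PySem.List.pyRange (i+1) n 1 := by
    simp [PySem.List.mem_pyRange_one]
  have htotal : lst.foldl (· + ·) 0
      = (PySem.List.pyRange 0 n 1).foldl (fun s j => s + g j) 0 := by
    rw [hn]
    exact (PySem.List.foldl_pyRange_zero_pyGetD' lst 0 (fun s x => s + x) 0).symm
  rw [htotal, hsplit]
  rw [List.foldl_append, List.foldl_append]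
  simp only [List.foldl_cons, ne_eq, not_true_eq_false, if_false]
  rw [pv_foldl_ite_skip g i _ hpre, pv_foldl_ite_skip g i _ hpost]
  rw [pv_foldl_add_eq, pv_foldl_add_eq, pv_foldl_add_eq]
  simp only [hg]
  ring

-- ===== VERDICT (by name: the statement is the Claim_ definition above) =====
theorem lst_ele_sum_spec : Claim_equal_lst_ele_sum := by
  intro lst _
  unfold Spec_lst_ele_sum lst_ele_sum lst_ele_sum_alt
  rw [PySem.List.foldl_append_singleton_eq_map]
  simp only [List.nil_append]
  have hmap : (PySem.List.pyRange 0 (lst.length : Int) 1).map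
        (fun i => lst.foldl (· + ·) 0 - PySem.List.pyGetD lst i 0)
      = lst.map (fun x => lst.foldl (· + ·) 0 - x) := by
    have h := PySem.List.map_pyGetD_pyRange_zero' lst (0 : Int)
    calc (PySem.List.pyRange 0 (lst.length : Int) 1).map
          (fun i => lst.foldl (· + ·) 0 - PySem.List.pyGetD lst i 0)
        = ((PySem.List.pyRange 0 (lst.length : Int) 1).map
            (fun i => PySem.List.pyGetD lst i 0)).map
            (fun x => lst.foldl (· + ·) 0 - x) := by
          rw [List.map_map]; rfl
      _ = lst.map (fun x => lst.foldl (· + ·) 0 - x) := by rw [h]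
  rw [← hmap]
  apply List.map_congr_left
  intro i hi
  rw [PySem.List.mem_pyRange_one] at hi
  exact pv_inner_eq lst i hi.1 hi.2
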